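-- pv_equiv track=rewrite | github.com/kuznetsovvj/education | algorithms/codeforces/1363a.py | check
-- ===== SOURCE A (Python) =====
-- def check(n, seq):
--     even, odd = 0, 0
--     for item in seq:
--         if item % 2 == 0:
--             even += 1
--         else:
--             odd += 1
--     if odd == 0:
--         return "NO"
--     if odd % 2 == 0 and n == len(seq):
--         return "NO"
--     if n % 2 == 0 and even == 0:
--         return "NO"
--     return "YES"
-- ===== SOURCE B (Python) =====
-- # Table-driven: one pass folds seq into a 3-bit state (bit0 has_odd, bit1
-- # odd-count parity, bit2 has_even); the answer is a lookup in a precomputed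
-- # truth table keyed by (state, n % 2, n == len(seq)).
-- TABLE = {
--     (mask, p, full): ("YES" if (mask & 1) and ((mask & 2) or not full) and (p or (mask & 4)) else "NO")
--     for mask in range(8) for p in (0, 1) for full in (False, True)
-- }
--
--
-- def check(n, seq):
--     mask = 0
--     for x in seq:
--         mask = (mask | 1) ^ 2 if x % 2 else mask | 4
--     return TABLE[mask, n % 2, n == len(seq)]
-- ===== Notes on version B (the rewrite author's own statement) =====
-- stated objective: alternative
-- what changed: Replaces the even/odd counters and the chain of NO-guards by a 3-bit DFA (a bitmask updated with |/^ in one pass) whose final state, together with n's parity and n==len(seq), indexes a precomputed 32-entry truth table.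
import Mathlib
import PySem

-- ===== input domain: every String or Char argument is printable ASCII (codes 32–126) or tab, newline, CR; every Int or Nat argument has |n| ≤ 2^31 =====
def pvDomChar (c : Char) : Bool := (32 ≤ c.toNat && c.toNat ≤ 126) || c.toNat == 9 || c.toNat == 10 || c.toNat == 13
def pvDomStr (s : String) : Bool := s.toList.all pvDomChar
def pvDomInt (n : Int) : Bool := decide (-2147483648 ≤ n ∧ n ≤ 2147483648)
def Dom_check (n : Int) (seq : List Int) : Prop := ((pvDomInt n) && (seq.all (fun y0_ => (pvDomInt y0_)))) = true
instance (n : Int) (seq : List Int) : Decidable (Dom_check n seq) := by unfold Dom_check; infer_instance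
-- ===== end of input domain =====

-- B replaces A's even/odd counters and guard chain by a 3-bit bitmask DFA plus a
-- precomputed truth-table lookup (objective: alternative formulation, same O(n) cost).


-- ===== PORT A =====
def check (n : Int) (seq : List Int) : String :=
  let p := seq.foldl (fun (st : Int × Int) item =>
    if PySem.Int.mod item 2 = 0 then (st.1 + 1, st.2) else (st.1, st.2 + 1)) (0, 0)
  let even := p.1
  let odd := p.2
  if odd = 0 then "NO"
  else if PySem.Int.mod odd 2 = 0 ∧ n = (seq.length : Int) then "NO"
  else if PySem.Int.mod n 2 = 0 ∧ even = 0 then "NO"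
  else "YES"

-- ===== PORT B =====
-- module-level dict comprehension building the truth table (insertion order =
-- nested loop order mask, p, full; Python truthiness of 'mask & k' / 'p' = ≠ 0)
def TABLE : PySem.Dict (Int × Int × Bool) String :=
  (PySem.List.pyRange 0 8 1).foldl (fun d mask =>
    (([0, 1] : List Int)).foldl (fun d p =>
      (([false, true] : List Bool)).foldl (fun d full =>
        d.insert (mask, p, full)
          (if PySem.Int.band mask 1 ≠ 0 ∧ (PySem.Int.band mask 2 ≠ 0 ∨ ¬ full = true)
              ∧ (p ≠ 0 ∨ PySem.Int.band mask 4 ≠ 0) then "YES" else "NO")) d) d)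
    PySem.Dict.empty

def check_alt (n : Int) (seq : List Int) : String :=
  let mask := seq.foldl (fun m x =>
    if PySem.Int.mod x 2 ≠ 0 then PySem.Int.bxor (PySem.Int.bor m 1) 2
    else PySem.Int.bor m 4) 0
  -- TABLE[key]: the key is always present (mask ∈ 0..7, n % 2 ∈ {0,1}), so
  -- Python's lookup never raises; .getD "" is exact on every reachable input.
  (TABLE.get? (mask, PySem.Int.mod n 2, decide (n = (seq.length : Int)))).getD ""

-- ===== PRECONDITION & SPEC =====
def Spec_check (n : Int) (seq : List Int) (out : String) : Prop := out = check_alt n seq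
instance (n : Int) (seq : List Int) (out : String) : Decidable (Spec_check n seq out) := by unfold Spec_check; infer_instance

-- ===== CLAIM (what is proved, stated in full; the proofs are below) =====
def Claim_equal_check : Prop := ∀ (n : Int) (seq : List Int), Dom_check n seq → Spec_check n seq (check n seq)

-- ===== LEMMAS AND PROOFS =====

-- Python's x % 2 is Lean's emod (positive divisor).
lemma modtwo (x : Int) : PySem.Int.mod x 2 = x % 2 := PySem.Int.mod_eq_emod_of_pos (by omega)

def oddp : Int → Bool := fun x => decide (PySem.Int.mod x 2 ≠ 0)
def evenp : Int → Bool := fun x => decide (PySem.Int.mod x 2 = 0)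

-- the 3-bit state encoding B maintains
def enc (ho op he : Bool) : Int :=
  (if ho then 1 else 0) + (if op then 2 else 0) + (if he then 4 else 0)

-- B's fold computes the encoded flags (has_odd, odd-count parity, has_even).
lemma fold_enc (seq : List Int) : ∀ ho op he : Bool,
    seq.foldl (fun m x =>
      if PySem.Int.mod x 2 ≠ 0 then PySem.Int.bxor (PySem.Int.bor m 1) 2
      else PySem.Int.bor m 4) (enc ho op he)
    = enc (ho || seq.any oddp) (op ^^ (seq.countP oddp % 2 == 1)) (he || seq.any evenp) := by
  induction seq with
  | nil => intro ho op he; simp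
  | cons a t ih =>
    intro ho op he
    rw [List.foldl_cons]
    by_cases h : PySem.Int.mod a 2 = 0
    · have h1 : oddp a = false := by simp only [oddp, h]; decide
      have h2 : evenp a = true := by simp only [evenp, h]; decide
      have hstep : (if PySem.Int.mod a 2 ≠ 0 then PySem.Int.bxor (PySem.Int.bor (enc ho op he) 1) 2
          else PySem.Int.bor (enc ho op he) 4) = enc ho op true := by
        rw [if_neg (not_not_intro h)]
        cases ho <;> cases op <;> cases he <;> decide
      rw [hstep, ih]
      simp [h1, h2]
    · have h1 : oddp a = true := by simp only [oddp]; exact decide_eq_true h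
      have h2 : evenp a = false := by simp only [evenp]; exact decide_eq_false h
      have hstep : (if PySem.Int.mod a 2 ≠ 0 then PySem.Int.bxor (PySem.Int.bor (enc ho op he) 1) 2
          else PySem.Int.bor (enc ho op he) 4) = enc true (!op) he := by
        rw [if_pos h]
        cases ho <;> cases op <;> cases he <;> decide
      rw [hstep, ih]
      have hc : (a :: t).countP oddp = t.countP oddp + 1 := by
        rw [List.countP_cons, h1]; simp
      rw [hc]
      have hpar : ((t.countP oddp + 1) % 2 == 1) = !(t.countP oddp % 2 == 1) := by
        rcases Nat.even_or_odd (t.countP oddp) with he' | ho'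
        · simp [Nat.add_mod, Nat.even_iff.mp he']
        · simp [Nat.add_mod, Nat.odd_iff.mp ho']
      rw [hpar]
      simp [h1, h2]

-- A's fold computes the even/odd counts.
lemma fold_counts (seq : List Int) (e o : Int) :
    seq.foldl (fun (st : Int × Int) item =>
      if PySem.Int.mod item 2 = 0 then (st.1 + 1, st.2) else (st.1, st.2 + 1)) (e, o)
    = (e + (seq.countP evenp : Int), o + (seq.countP oddp : Int)) := by
  induction seq generalizing e o with
  | nil => simp
  | cons a t ih =>
    rw [List.foldl_cons, List.countP_cons, List.countP_cons]
    by_cases h : PySem.Int.mod a 2 = 0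
    · have h1 : evenp a = true := by simp only [evenp, h]; decide
      have h2 : oddp a = false := by simp only [oddp, h]; decide
      rw [if_pos h, ih]
      refine Prod.ext ?_ ?_ <;> simp [h1, h2] <;> push_cast <;> ring
    · have h1 : evenp a = false := by simp only [evenp]; exact decide_eq_false h
      have h2 : oddp a = true := by simp only [oddp]; exact decide_eq_true h
      rw [if_neg h, ih]
      refine Prod.ext ?_ ?_ <;> simp [h1, h2] <;> push_cast <;> ring

lemma fold_enc0 (seq : List Int) :
    seq.foldl (fun m x =>
      if PySem.Int.mod x 2 ≠ 0 then PySem.Int.bxor (PySem.Int.bor m 1) 2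
      else PySem.Int.bor m 4) 0
    = enc (seq.any oddp) (seq.countP oddp % 2 == 1) (seq.any evenp) := by
  simpa using fold_enc seq false false false

lemma countP_zero_iff (seq : List Int) (p : Int → Bool) :
    ((seq.countP p : Int) = 0) ↔ seq.any p = false := by
  rw [show ((seq.countP p : Int) = 0 ↔ seq.countP p = 0) from by omega,
      List.countP_eq_zero, List.any_eq_false]

lemma count_parity (seq : List Int) :
    (PySem.Int.mod (seq.countP oddp : Int) 2 = 0) ↔ (seq.countP oddp % 2 == 1) = false := by
  rw [modtwo]
  simp only [beq_eq_false_iff_ne, ne_eq]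
  omega

-- TABLE lookup at an encoded state evaluates to the positive-form decision.
lemma table_eval (ho op he f : Bool) (p : Int) (hp : p = 0 ∨ p = 1) :
    (TABLE.get? (enc ho op he, p, f)).getD ""
    = if ho = true ∧ (op = true ∨ f = false) ∧ (p = 1 ∨ he = true) then "YES" else "NO" := by
  rcases hp with h | h <;> subst h <;>
    cases ho <;> cases op <;> cases he <;> cases f <;> decide

-- A's guard chain in positive form, over the three flags.
lemma A_eval (n : Int) (seq : List Int) :
    check n seq
    = if seq.any oddp = true ∧ ((seq.countP oddp % 2 == 1) = true ∨ ¬ n = (seq.length : Int))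
         ∧ (n % 2 = 1 ∨ seq.any evenp = true) then "YES" else "NO" := by
  unfold check
  rw [fold_counts]
  simp only [zero_add]
  have hho := countP_zero_iff seq oddp
  have hhe := countP_zero_iff seq evenp
  have hop := count_parity seq
  rw [modtwo n]
  by_cases hO : seq.any oddp = true
  · have hne : ¬ ((seq.countP oddp : Int) = 0) := by
      intro hc; rw [hho.mp hc] at hO; exact Bool.false_ne_true hO
    rw [if_neg hne]
    by_cases hP : (seq.countP oddp % 2 == 1) = true
    · have : ¬ PySem.Int.mod (seq.countP oddp : Int) 2 = 0 := by
        intro hc; rw [hop.mp hc] at hP; exact Bool.false_ne_true hP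
      rw [if_neg (by tauto)]
      by_cases hn : n % 2 = 0
      · by_cases hE : seq.any evenp = true
        · have : ¬ ((seq.countP evenp : Int) = 0) := by
            intro hc; rw [hhe.mp hc] at hE; exact Bool.false_ne_true hE
          rw [if_neg (by tauto), if_pos (by refine ⟨hO, Or.inl hP, Or.inr hE⟩)]
        · rw [if_pos ⟨hn, hhe.mpr (Bool.eq_false_iff.mpr hE)⟩,
              if_neg (by intro hc; rcases hc.2.2 with h | h; omega; exact hE h)]
      · have hn1 : n % 2 = 1 := by rcases Int.emod_two_eq n with h | h; exact absurd h hn; exact h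
        rw [if_neg (by tauto), if_pos ⟨hO, Or.inl hP, Or.inl hn1⟩]
    · have hm0 : PySem.Int.mod (seq.countP oddp : Int) 2 = 0 :=
        hop.mpr (Bool.eq_false_iff.mpr hP)
      by_cases hlen : n = (seq.length : Int)
      · rw [if_pos ⟨hm0, hlen⟩, if_neg (by intro hc; rcases hc.2.1 with h | h; exact hP h; exact h hlen)]
      · rw [if_neg (by intro hc; exact hlen hc.2)]
        by_cases hn : n % 2 = 0
        · by_cases hE : seq.any evenp = true
          · have : ¬ ((seq.countP evenp : Int) = 0) := by
              intro hc; rw [hhe.mp hc] at hE; exact Bool.false_ne_true hE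
            rw [if_neg (by tauto), if_pos ⟨hO, Or.inr hlen, Or.inr hE⟩]
          · rw [if_pos ⟨hn, hhe.mpr (Bool.eq_false_iff.mpr hE)⟩,
                if_neg (by intro hc; rcases hc.2.2 with h | h; omega; exact hE h)]
        · have hn1 : n % 2 = 1 := by rcases Int.emod_two_eq n with h | h; exact absurd h hn; exact h
          rw [if_neg (by tauto), if_pos ⟨hO, Or.inr hlen, Or.inl hn1⟩]
  · rw [if_pos (hho.mpr (Bool.eq_false_iff.mpr hO)), if_neg (by tauto)]

-- ===== VERDICT (by name: the statement is the Claim_ definition above) =====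
theorem check_spec : Claim_equal_check := by
  intro n seq _
  unfold Spec_check check_alt
  rw [A_eval, fold_enc0, modtwo n,
      table_eval _ _ _ _ _ (Int.emod_two_eq n)]
  simp only [decide_eq_false_iff_not]
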